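-- pv_equiv track=rewrite | github.com/DanielQ56/AdventOfCode | AdventOfCode2020/Day6.py | CountAnswersAll
-- ===== SOURCE A (Python) =====
-- def CountAnswersAll(groups):
--     answers = {}
--
--     for group in groups:
--         gr = set(group.replace("\n", ""))
--         grp = group.split("\n")
--
--         for l in gr:
--             if all(l in g for g in grp):
--                 if l in answers:
--                     answers[l] += 1
--                 else:
--                     answers[l] = 1
--
--     return sum(a for a in answers.values())
-- ===== SOURCE B (Python) =====
-- def CountAnswersAll(groups):
--     total = 0
--     for group in groups:
--         first, *rest = group.split("\n")
--         common = set(first)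
--         for line in rest:
--             common &= set(line)
--         total += len(common)
--     return total
-- ===== Notes on version B (the rewrite author's own statement) =====
-- stated objective: simpler
-- what changed: Drops the global answers dict and the per-letter all(l in g) membership scans; each group's common letters are instead the fold of set-intersections of its lines, and the intersection sizes are summed directly.
import Mathlib
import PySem

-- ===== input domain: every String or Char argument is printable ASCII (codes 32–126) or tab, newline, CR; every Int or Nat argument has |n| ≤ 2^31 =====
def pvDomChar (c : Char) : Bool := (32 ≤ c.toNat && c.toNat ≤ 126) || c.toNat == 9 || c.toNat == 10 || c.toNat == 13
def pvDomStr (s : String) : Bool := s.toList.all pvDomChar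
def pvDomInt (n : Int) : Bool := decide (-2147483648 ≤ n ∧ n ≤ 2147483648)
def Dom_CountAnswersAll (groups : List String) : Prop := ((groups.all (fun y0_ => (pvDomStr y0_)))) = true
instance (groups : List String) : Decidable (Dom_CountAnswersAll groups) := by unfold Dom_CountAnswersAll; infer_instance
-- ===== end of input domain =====

-- B replaces A's global answers dict and per-letter `all(l in g)` scans by a per-group fold of
-- set intersections of the group's lines, summing the intersection sizes directly (objective: simpler).

-- ===== PORT A =====
def CountAnswersAll (groups : List String) : Int :=
  let answers : PySem.Dict Char Int :=
    groups.foldl (fun answers group =>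
      let gr : PySem.Set Char := PySem.Set.ofList (PySem.Str.replace group "\n" "").toList
      -- group.split("\n"): the separator is the non-empty literal "\n", so split? is always `some`
      let grp : List String := (PySem.Str.split? group "\n").getD []
      gr.foldl (fun answers l =>
        if grp.all (fun g => PySem.Str.isIn (String.ofList [l]) g) then
          if answers.contains l then answers.insert l (answers.getD l 0 + 1)
          else answers.insert l 1
        else answers) answers) PySem.Dict.empty
  answers.values.sum

-- ===== PORT B =====
def CountAnswersAll_alt (groups : List String) : Int :=
  groups.foldl (fun total group =>
    match (PySem.Str.split? group "\n").getD [] with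
    | [] => total   -- totality guard only: split("\n") never returns an empty list
    | first :: rest =>
      let common := rest.foldl (fun c line => PySem.Set.inter c (PySem.Set.ofList line.toList))
        (PySem.Set.ofList first.toList)
      total + PySem.Set.len common) 0

-- ===== PRECONDITION & SPEC =====
def Spec_CountAnswersAll (groups : List String) (out : Int) : Prop := out = CountAnswersAll_alt groups
instance (groups : List String) (out : Int) : Decidable (Spec_CountAnswersAll groups out) := by unfold Spec_CountAnswersAll; infer_instance

-- ===== CLAIM (what is proved, stated in full; the proofs are below) =====
def Claim_equal_CountAnswersAll : Prop := ∀ (groups : List String), Dom_CountAnswersAll groups → Spec_CountAnswersAll groups (CountAnswersAll groups)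

-- ===== LEMMAS AND PROOFS =====

-- the chars of one group that count: members of set(group.replace("\n","")) contained in every line
def pvQual (group : String) : List Char :=
  (PySem.Set.ofList (PySem.Str.replace group "\n" "").toList).filter
    (fun l => ((PySem.Str.split? group "\n").getD []).all
      (fun g => PySem.Str.isIn (String.ofList [l]) g))

-- `s.replace(c, "")` removes exactly the occurrences of the single char c
theorem pv_replace_go_filter (c : Char) :
    ∀ (fuel : Nat) (l acc : List Char), l.length ≤ fuel →
      PySem.Chars.replace.go [c] [] fuel l acc = acc.reverse ++ l.filter (· ≠ c) := by
  intro fuel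
  induction fuel with
  | zero => intro l acc h; rw [List.length_eq_zero_iff.mp (Nat.le_zero.mp h)]; simp [PySem.Chars.replace.go]
  | succ n ih =>
    intro l acc h
    cases l with
    | nil => simp [PySem.Chars.replace.go]
    | cons x t =>
      simp only [PySem.Chars.replace.go]
      by_cases hx : x = c
      · subst hx
        rw [if_pos (by simp [List.isPrefixOf])]
        rw [show List.drop [x].length (x :: t) = t by simp, show ([] : List Char).reverse ++ acc = acc by simp]
        rw [ih t acc (by simpa using Nat.le_of_succ_le_succ h)]
        simp
      · have : [c].isPrefixOf (x :: t) = false := by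
          simp [List.isPrefixOf]; exact fun hxc => absurd hxc.symm hx
        rw [this]
        simp only [Bool.false_eq_true, if_false]
        rw [ih t (x :: acc) (by simpa using Nat.le_of_succ_le_succ h)]
        simp [hx]

theorem pv_replace_chars (s : String) :
    (PySem.Str.replace s "\n" "").toList = s.toList.filter (· ≠ '\n') := by
  rw [PySem.Str.toList_replace]
  show PySem.Chars.replace s.toList ['\n'] [] = _
  simp only [PySem.Chars.replace]
  rw [if_neg (by simp)]
  exact pv_replace_go_filter '\n' s.toList.length s.toList [] (by omega)

-- split never returns the empty list of pieces
theorem pv_splitOn_go_ne_nil (sep : List Char) :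
    ∀ (fuel : Nat) (l cur : List Char) (acc : List (List Char)),
      PySem.Chars.splitOn.go sep fuel l cur acc ≠ [] := by
  intro fuel
  induction fuel with
  | zero => intro l cur acc; simp [PySem.Chars.splitOn.go]
  | succ n ih =>
    intro l cur acc
    cases l with
    | nil => simp [PySem.Chars.splitOn.go]
    | cons x t =>
      simp only [PySem.Chars.splitOn.go]
      split
      · exact ih _ _ _
      · exact ih _ _ _

-- every char of every piece of a split on [c] is a char of the input distinct from c
theorem pv_splitOn_go_chars (c : Char) :
    ∀ (fuel : Nat) (l cur : List Char) (acc : List (List Char)), l.length ≤ fuel →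
      ∀ pc ∈ PySem.Chars.splitOn.go [c] fuel l cur acc, ∀ x ∈ pc,
        (∃ q ∈ acc, x ∈ q) ∨ x ∈ cur ∨ (x ∈ l ∧ x ≠ c) := by
  intro fuel
  induction fuel with
  | zero =>
    intro l cur acc h pc hpc x hx
    rw [List.length_eq_zero_iff.mp (Nat.le_zero.mp h)] at hpc
    simp only [PySem.Chars.splitOn.go, List.mem_reverse, List.mem_cons] at hpc
    rcases hpc with h1 | h2
    · subst h1; simp at hx; tauto
    · exact Or.inl ⟨pc, h2, hx⟩
  | succ n ih =>
    intro l cur acc h pc hpc x hx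
    cases l with
    | nil =>
      simp only [PySem.Chars.splitOn.go, List.mem_reverse, List.mem_cons] at hpc
      rcases hpc with h1 | h2
      · subst h1; simp at hx; tauto
      · exact Or.inl ⟨pc, h2, hx⟩
    | cons y t =>
      simp only [PySem.Chars.splitOn.go] at hpc
      by_cases hy : y = c
      · subst hy
        rw [if_pos (by simp [List.isPrefixOf])] at hpc
        have := ih (List.drop [y].length (y :: t)) [] (cur.reverse :: acc)
          (by simpa using Nat.le_of_succ_le_succ h) pc hpc x hx
        rcases this with ⟨q, hq, hxq⟩ | h2 | ⟨h3, h4⟩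
        · rcases List.mem_cons.mp hq with rfl | hq
          · exact Or.inr (Or.inl (by simpa using hxq))
          · exact Or.inl ⟨q, hq, hxq⟩
        · simp at h2
        · refine Or.inr (Or.inr ⟨?_, h4⟩); simp at h3 ⊢; tauto
      · rw [if_neg (by simp [List.isPrefixOf]; exact fun hyc => absurd hyc.symm hy)] at hpc
        have := ih t (y :: cur) acc (by simpa using Nat.le_of_succ_le_succ h) pc hpc x hx
        rcases this with h1 | h2 | ⟨h3, h4⟩
        · exact Or.inl h1
        · rcases List.mem_cons.mp h2 with rfl | h2
          · exact Or.inr (Or.inr ⟨by simp, hy⟩)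
          · exact Or.inr (Or.inl h2)
        · exact Or.inr (Or.inr ⟨by simp [h3], h4⟩)

theorem pv_splitOn_chars (cs : List Char) (c : Char) :
    ∀ pc ∈ PySem.Chars.splitOn cs [c], ∀ x ∈ pc, x ∈ cs ∧ x ≠ c := by
  intro pc hpc x hx
  have := pv_splitOn_go_chars c (cs.length + 1) cs [] [] (by omega) pc hpc x hx
  simpa using this

theorem pv_splitOn_ne_nil (cs : List Char) (c : Char) :
    PySem.Chars.splitOn cs [c] ≠ [] := pv_splitOn_go_ne_nil [c] _ _ _ _

-- the pieces of group.split("\n"), on the char level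
theorem pv_split_eq (group : String) :
    (PySem.Str.split? group "\n").getD []
      = (PySem.Chars.splitOn group.toList ['\n']).map String.ofList := by
  simp [PySem.Str.split?, PySem.Chars.split?]

-- membership in the fold of intersections
theorem pv_mem_foldl_inter (lines : List String) (s : PySem.Set Char) (x : Char) :
    (x ∈ lines.foldl (fun c line => PySem.Set.inter c (PySem.Set.ofList line.toList)) s)
      ↔ (x ∈ s ∧ ∀ line ∈ lines, x ∈ line.toList) := by
  induction lines generalizing s with
  | nil => simp
  | cons l ls ih =>
    rw [List.foldl_cons, ih]
    simp [PySem.Set.mem_inter, PySem.Set.mem_ofList]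
    tauto

theorem pv_nodup_foldl_inter (lines : List String) (s : PySem.Set Char) (h : s.Nodup) :
    (lines.foldl (fun c line => PySem.Set.inter c (PySem.Set.ofList line.toList)) s).Nodup := by
  induction lines generalizing s with
  | nil => exact h
  | cons l ls ih => exact ih _ (PySem.Set.nodup_inter _ _ h)

-- the chars that qualify in a group are exactly the members of the intersection of its lines
theorem pv_mem_qual (group : String) (pc0 : List Char) (pcs : List (List Char))
    (hsp : PySem.Chars.splitOn group.toList ['\n'] = pc0 :: pcs) (x : Char) :
    x ∈ pvQual group ↔ (x ∈ pc0 ∧ ∀ pc ∈ pcs, x ∈ pc) := by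
  unfold pvQual
  rw [pv_split_eq, hsp, List.mem_filter]
  rw [PySem.Set.mem_ofList, pv_replace_chars, List.mem_filter]
  have hall : (((pc0 :: pcs).map String.ofList).all
      (fun g => PySem.Str.isIn (String.ofList [x]) g) = true)
      ↔ (x ∈ pc0 ∧ ∀ pc ∈ pcs, x ∈ pc) := by
    simp only [List.all_eq_true, List.mem_map, forall_exists_index, and_imp]
    constructor
    · intro h
      constructor
      · have := h (String.ofList pc0) pc0 (by simp) rfl
        rw [PySem.Str.isIn_iff_infix] at this
        simpa [List.singleton_infix_iff] using this
      · intro pc hpc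
        have := h (String.ofList pc) pc (by simp [hpc]) rfl
        rw [PySem.Str.isIn_iff_infix] at this
        simpa [List.singleton_infix_iff] using this
    · rintro ⟨h0, hr⟩ g pc hpc rfl
      rw [PySem.Str.isIn_iff_infix]
      simp only [String.toList_ofList, List.singleton_infix_iff]
      rcases List.mem_cons.mp hpc with rfl | hpc
      · exact h0
      · exact hr pc hpc
  rw [hall]
  constructor
  · rintro ⟨_, h⟩; exact h
  · rintro ⟨h0, hr⟩
    have hin := pv_splitOn_chars group.toList '\n' pc0 (by rw [hsp]; simp) x h0
    exact ⟨⟨hin.1, by simpa using hin.2⟩, h0, hr⟩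

-- the per-group summand of B adds exactly the number of qualifying chars of the group
theorem pv_group_count (t : Int) (group : String) :
    (match (PySem.Str.split? group "\n").getD [] with
      | [] => t
      | first :: rest =>
        t + PySem.Set.len (rest.foldl (fun c line => PySem.Set.inter c (PySem.Set.ofList line.toList))
          (PySem.Set.ofList first.toList)))
      = t + ((pvQual group).length : Int) := by
  rw [pv_split_eq]
  rcases hsp : PySem.Chars.splitOn group.toList ['\n'] with _ | ⟨pc0, pcs⟩
  · exact absurd hsp (pv_splitOn_ne_nil _ _)
  · simp only [List.map_cons]
    have hperm : (List.foldl (fun c line => PySem.Set.inter c (PySem.Set.ofList line.toList))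
        (PySem.Set.ofList (String.ofList pc0).toList) (pcs.map String.ofList)).Perm (pvQual group) := by
      apply (List.perm_ext_iff_of_nodup
        (pv_nodup_foldl_inter _ _ (PySem.Set.nodup_ofList _))
        (by unfold pvQual; exact List.Nodup.filter _ (PySem.Set.nodup_ofList _))).mpr
      intro x
      rw [pv_mem_foldl_inter, pv_mem_qual group pc0 pcs hsp x]
      simp only [PySem.Set.mem_ofList, String.toList_ofList, List.mem_map]
      constructor
      · rintro ⟨h0, hr⟩
        exact ⟨h0, fun pc hpc => by simpa using hr (String.ofList pc) ⟨pc, hpc, rfl⟩⟩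
      · rintro ⟨h0, hr⟩
        exact ⟨h0, by rintro g ⟨pc, hpc, rfl⟩; simpa using hr pc hpc⟩
    rw [PySem.Set.len, hperm.length_eq]

-- folding over a flatMap is the nested fold
theorem pv_foldl_flatMap {α β γ : Type} (g : γ → β → γ) (f : α → List β) :
    ∀ (l : List α) (d : γ), (l.flatMap f).foldl g d = l.foldl (fun d a => (f a).foldl g d) d := by
  intro l
  induction l with
  | nil => intro d; rfl
  | cons a l ih => intro d; rw [List.flatMap_cons, List.foldl_append, List.foldl_cons, ih]

-- the sum of a Counter's values is the length of the counted list
theorem pv_counter_values_sum (xs : List Char) :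
    (PySem.Dict.counter xs).values.sum = (xs.length : Int) := by
  have hv : (PySem.Dict.counter xs).values = (PySem.Dict.counter xs).items.map (·.2) := rfl
  rw [hv, PySem.Dict.items_counter, List.map_map]
  have hperm : (PySem.Set.ofList xs).Perm xs.dedup := by
    rw [List.perm_ext_iff_of_nodup (PySem.Set.nodup_ofList _) (List.nodup_dedup _)]
    intro a; rw [PySem.Set.mem_ofList, List.mem_dedup]
  rw [List.Perm.sum_eq (hperm.map _)]
  show ((xs.dedup.map (fun k => ((xs.count k : Nat) : Int)))).sum = _
  rw [show xs.dedup.map (fun k => ((xs.count k : Nat) : Int))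
      = (xs.dedup.map (fun k => xs.count k)).map (fun n : Nat => (n : Int)) by rw [List.map_map]; rfl]
  rw [← Nat.cast_list_sum]
  rw [show xs.dedup.map (fun k => xs.count k) = xs.dedup.map (fun k => List.count k xs) from rfl]
  rw [List.sum_map_count_dedup_eq_length]

-- A's dict-building loop is counting: its values-sum is the number of qualifying chars overall
theorem pv_A_eq (groups : List String) :
    CountAnswersAll groups = ((groups.flatMap pvQual).length : Int) := by
  show (groups.foldl _ PySem.Dict.empty).values.sum = _
  have hinner : ∀ (d : PySem.Dict Char Int) (group : String),
      (PySem.Set.ofList (PySem.Str.replace group "\n" "").toList).foldl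
        (fun answers l =>
          if ((PySem.Str.split? group "\n").getD []).all
              (fun g => PySem.Str.isIn (String.ofList [l]) g) then
            if answers.contains l then answers.insert l (answers.getD l 0 + 1)
            else answers.insert l 1
          else answers) d
      = (pvQual group).foldl (fun d x => d.insert x (d.getD x 0 + 1)) d := by
    intro d group
    unfold pvQual
    rw [List.foldl_filter]
    apply PySem.List.foldl_congr_mem
    intro d' l _
    by_cases hc : ((PySem.Str.split? group "\n").getD []).all
        (fun g => PySem.Str.isIn (String.ofList [l]) g)
    · rw [if_pos hc, if_pos hc]
      by_cases hm : d'.contains l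
      · rw [if_pos hm]
      · rw [if_neg (by simpa using hm),
          PySem.Dict.getD_of_not_contains d' 0 (by simpa using hm), zero_add]
    · rw [if_neg hc, if_neg hc]
  simp only [hinner]
  rw [← pv_foldl_flatMap (fun d x => PySem.Dict.insert d x (d.getD x 0 + 1)) pvQual groups
      PySem.Dict.empty]
  rw [PySem.Dict.foldl_insert_getD_add_one_eq_counter]
  exact pv_counter_values_sum _

theorem pv_B_eq (groups : List String) :
    CountAnswersAll_alt groups = ((groups.flatMap pvQual).length : Int) := by
  show groups.foldl _ 0 = _
  have key : ∀ (gs : List String) (t : Int),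
      gs.foldl (fun total group =>
        match (PySem.Str.split? group "\n").getD [] with
        | [] => total
        | first :: rest =>
          total + PySem.Set.len (rest.foldl
            (fun c line => PySem.Set.inter c (PySem.Set.ofList line.toList))
            (PySem.Set.ofList first.toList))) t
      = t + ((gs.flatMap pvQual).length : Int) := by
    intro gs
    induction gs with
    | nil => intro t; simp
    | cons g gs ih =>
      intro t
      rw [List.foldl_cons, pv_group_count t g, ih, List.flatMap_cons, List.length_append]
      push_cast
      ring
  rw [key groups 0, zero_add]

-- ===== VERDICT (by name: the statement is the Claim_ definition above) =====
theorem CountAnswersAll_spec : Claim_equal_CountAnswersAll := by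
  intro groups _
  show CountAnswersAll groups = CountAnswersAll_alt groups
  rw [pv_A_eq, pv_B_eq]
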